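-- pv_equiv track=rewrite | github.com/l1mey112/progcomp-crap | spare/tie_breaker_recurse.py | find_sum_sets
-- ===== SOURCE A (Python) =====
-- def find_sum_sets(n, s):
-- 	# Indicates we've run out of number slots
-- 	if n == 0:
-- 		if s == 0:
-- 			# Valid solution, so we return an empty list
-- 			# (which will later have the rest of the chain added to it)
-- 			return [[]]
-- 		else:
-- 			return []
-- 	if s < 0:
-- 		return []
--
-- 	sets = []
-- 	for i in range(s):
-- 		# Recurse
-- 		subsets = find_sum_sets(n - 1, s - (i + 1))
--
-- 		for subset in subsets:
-- 			# Check for duplicates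
-- 			if (i + 1) in subset:
-- 				continue
--
-- 			# Ensure first item in list is the smallest, otherwise throw out list
-- 			if len(subset):
-- 				if (i + 1) > subset[0]:
-- 					continue
--
-- 			sets.append([i + 1] + subset)
-- 	return sets
-- ===== SOURCE B (Python) =====
-- def _gen(n, s, lo):
--     # strictly increasing lists of length n with elements >= lo summing to s;
--     # recursion is one level per slot, so only increasing sequences are ever built
--     if n == 0:
--         return [[]] if s == 0 else []
--     sets = []
--     for f in range(lo, s + 1):
--         for rest in _gen(n - 1, s - f, f + 1):
--             sets.append([f] + rest)
--     return sets
--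
-- def find_sum_sets(n, s):
--     return _gen(n, s, 1)
-- ===== Notes on version B (the rewrite author's own statement) =====
-- stated objective: alternative
-- what changed: Instead of enumerating every first element 1..s and filtering out non-increasing/duplicate continuations a posteriori, B loops over the first element from a minimum-value bound and recurses once per slot, generating only strictly increasing sequences, so no candidate is ever built and discarded; intended as asymptotically faster, but A times out at the probe sizes where B returns, so no clean largest-size ratio is claimed.
import Mathlib
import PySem

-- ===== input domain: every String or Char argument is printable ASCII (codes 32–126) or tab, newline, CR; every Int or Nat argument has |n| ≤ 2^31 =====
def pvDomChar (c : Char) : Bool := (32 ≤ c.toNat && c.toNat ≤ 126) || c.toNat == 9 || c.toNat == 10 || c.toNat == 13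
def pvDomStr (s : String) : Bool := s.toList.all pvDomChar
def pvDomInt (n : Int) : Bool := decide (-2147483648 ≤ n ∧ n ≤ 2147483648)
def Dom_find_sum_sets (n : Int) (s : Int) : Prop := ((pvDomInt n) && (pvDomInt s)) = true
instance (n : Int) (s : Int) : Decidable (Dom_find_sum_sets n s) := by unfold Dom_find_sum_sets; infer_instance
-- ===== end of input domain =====

-- B loops over the first element with a minimum-next-value bound and recurses once per slot,
-- generating only increasing sequences instead of filtering all candidates like A.

-- ===== PORT A =====
-- Literal transliteration of A: for i in range(s) recurse, inner loop filters subsets by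
-- membership and first-element checks, appending [i+1] + subset into the accumulator `sets`.
def find_sum_sets (n : Int) (s : Int) : List (List Int) :=
  if n = 0 then (if s = 0 then [[]] else [])
  else if s < 0 then []
  else
    (PySem.List.pyRange 0 s 1).attach.foldl
      (fun sets i =>
        (find_sum_sets (n - 1) (s - (i.1 + 1))).foldl
          (fun sets2 subset =>
            if (i.1 + 1) ∈ subset then sets2
            else if subset.length ≠ 0 ∧ (i.1 + 1) > subset.headI then sets2
            else sets2 ++ [(i.1 + 1) :: subset])
          sets)
      []
termination_by s.toNat
decreasing_by
  have h := (PySem.List.mem_pyRange_one.mp i.2)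
  omega

-- ===== PORT B =====
-- Literal transliteration of _gen from Source B: for f in range(lo, s+1) recurse with bound f+1,
-- appending [f] + rest. lo is always ≥ 1 in Source B, so it is carried as a Nat; f ≥ lo ≥ 1
-- makes f.toNat + 1 exactly Python's f + 1.
def pvGen (n : Int) (s : Int) (lo : Nat) : List (List Int) :=
  if n = 0 then (if s = 0 then [[]] else [])
  else
    (PySem.List.pyRange lo (s + 1) 1).attach.foldl
      (fun sets f =>
        (pvGen (n - 1) (s - f.1) (f.1.toNat + 1)).foldl
          (fun sets2 rest => sets2 ++ [f.1 :: rest])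
          sets)
      []
termination_by (s + 1 - lo).toNat
decreasing_by
  have h := (PySem.List.mem_pyRange_one.mp f.2)
  omega

def find_sum_sets_alt (n : Int) (s : Int) : List (List Int) := pvGen n s 1

-- ===== PRECONDITION & SPEC =====
-- Pre_ excludes exactly the inputs on which Python A's recursion nests deeper than CPython's
-- recursion limit and raises RecursionError: A recurses one level per slot (depth n+1 when
-- n ≥ 0) and, when n is negative, one level per unit of s (depth up to s+1); the bound 800
-- is a conservative margin under the default limit of 1000.
def Pre_find_sum_sets (n : Int) (s : Int) : Prop := s ≤ 800 ∨ (0 ≤ n ∧ n ≤ 800)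
instance (n : Int) (s : Int) : Decidable (Pre_find_sum_sets n s) := by unfold Pre_find_sum_sets; infer_instance
def pvWitness_find_sum_sets : Int × Int := (3, 10)

def Spec_find_sum_sets (n : Int) (s : Int) (out : List (List Int)) : Prop := out = find_sum_sets_alt n s
instance (n : Int) (s : Int) (out : List (List Int)) : Decidable (Spec_find_sum_sets n s out) := by unfold Spec_find_sum_sets; infer_instance

-- ===== CLAIM (what is proved, stated in full; the proofs are below) =====
def Claim_equal_find_sum_sets : Prop := ∀ (n : Int) (s : Int), Dom_find_sum_sets n s → Pre_find_sum_sets n s → Spec_find_sum_sets n s (find_sum_sets n s)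

-- ===== LEMMAS AND PROOFS =====

-- A's inner-loop filter condition on a candidate subset, for first element v.
def pvKeep (v : Int) (t : List Int) : Bool :=
  decide (v ∉ t ∧ ¬(t.length ≠ 0 ∧ v > t.headI))

-- B's characterisation predicate: empty, or first element at least lo.
def pvGE (lo : Int) (t : List Int) : Bool := decide (t = [] ∨ lo ≤ t.headI)

lemma inner_eq (v : Int) (l : List (List Int)) (acc : List (List Int)) :
    l.foldl
      (fun sets2 subset =>
        if v ∈ subset then sets2
        else if subset.length ≠ 0 ∧ v > subset.headI then sets2
        else sets2 ++ [v :: subset])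
      acc
    = acc ++ (l.filter (pvKeep v)).map (v :: ·) := by
  induction l generalizing acc with
  | nil => simp
  | cons t l ih =>
    simp only [List.foldl_cons, List.filter_cons, ih, pvKeep]
    by_cases h1 : v ∈ t
    · simp [h1]
    · by_cases h2 : t.length ≠ 0 ∧ v > t.headI
      · simp [h1, h2]
      · have h2' : t = [] ∨ v ≤ t.headI := by
          by_cases ht : t = []
          · exact Or.inl ht
          · right
            by_contra hc
            exact h2 ⟨by simpa using ht, by omega⟩
        have h2'' : ¬(¬t = [] ∧ t.headI < v) := by
          rcases h2' with rfl | hle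
          · simp
          · rintro ⟨_, hlt⟩; omega
        simp [h1, h2'']

lemma inner_eq_B (v : Int) (l : List (List Int)) (acc : List (List Int)) :
    l.foldl (fun sets2 rest => sets2 ++ [v :: rest]) acc = acc ++ l.map (v :: ·) := by
  induction l generalizing acc with
  | nil => simp
  | cons t l ih => simp [List.foldl_cons, ih]

lemma A_eq (n s : Int) (hn : n ≠ 0) (hs : ¬ s < 0) :
    find_sum_sets n s
      = (PySem.List.pyRange 0 s 1).flatMap
          (fun i => ((find_sum_sets (n - 1) (s - (i + 1))).filter (pvKeep (i + 1))).map ((i + 1) :: ·)) := by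
  rw [find_sum_sets]
  simp only [if_neg hn, if_neg hs, inner_eq]
  rw [PySem.List.foldl_append_eq_flatMap]
  simp

-- A's outer loop, reindexed by the first element f = i + 1.
lemma A_eq' (n s : Int) (hn : n ≠ 0) (hs : ¬ s < 0) :
    find_sum_sets n s
      = (PySem.List.pyRange 1 (s + 1) 1).flatMap
          (fun f => ((find_sum_sets (n - 1) (s - f)).filter (pvKeep f)).map (f :: ·)) := by
  rw [A_eq n s hn hs, PySem.List.pyRange_one 0 s, PySem.List.pyRange_one 1 (s + 1)]
  simp only [List.flatMap_map]
  have hlen : (s - 0).toNat = (s + 1 - 1).toNat := by omega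
  rw [hlen]
  refine List.flatMap_congr ?_
  intro k _
  have h1 : (0 : Int) + k + 1 = 1 + k := by ring
  simp only [h1]

lemma B_eq (n s : Int) (lo : Nat) (hn : n ≠ 0) :
    pvGen n s lo
      = (PySem.List.pyRange lo (s + 1) 1).flatMap
          (fun f => (pvGen (n - 1) (s - f) (f.toNat + 1)).map (f :: ·)) := by
  rw [pvGen]
  simp only [if_neg hn, inner_eq_B]
  rw [PySem.List.foldl_append_eq_flatMap]
  simp

lemma A_sorted : ∀ (k : Nat) (s n : Int), s.toNat ≤ k →
    ∀ t ∈ find_sum_sets n s, t.Pairwise (· < ·) := by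
  intro k
  induction k with
  | zero =>
    intro s n hk t ht
    by_cases hn : n = 0
    · subst hn
      rw [find_sum_sets] at ht
      by_cases hs : s = 0 <;> simp [hs] at ht
      simp [ht]
    · by_cases hs : s < 0
      · rw [find_sum_sets] at ht; simp [hn, hs] at ht
      · rw [A_eq n s hn hs] at ht
        simp only [List.mem_flatMap, PySem.List.mem_pyRange_one] at ht
        obtain ⟨i, ⟨hi0, his⟩, _⟩ := ht
        omega
  | succ k ih =>
    intro s n hk t ht
    by_cases hn : n = 0
    · subst hn
      rw [find_sum_sets] at ht
      by_cases hs : s = 0 <;> simp [hs] at ht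
      simp [ht]
    · by_cases hs : s < 0
      · rw [find_sum_sets] at ht; simp [hn, hs] at ht
      · rw [A_eq n s hn hs] at ht
        simp only [List.mem_flatMap, PySem.List.mem_pyRange_one, List.mem_map,
          List.mem_filter] at ht
        obtain ⟨i, ⟨hi0, his⟩, t', ⟨ht', hkeep⟩, rfl⟩ := ht
        have hrec : t'.Pairwise (· < ·) := by
          refine ih (s - (i + 1)) (n - 1) (by omega) t' ht'
        simp only [pvKeep, decide_eq_true_eq] at hkeep
        obtain ⟨hnotmem, hhead⟩ := hkeep
        refine List.pairwise_cons.mpr ⟨?_, hrec⟩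
        intro x hx
        have hne : (i + 1) ≠ x := fun h => hnotmem (h ▸ hx)
        cases t' with
        | nil => simp at hx
        | cons h0 rest =>
          have hle : i + 1 ≤ h0 := by
            by_contra hc
            refine hhead ⟨by simp, ?_⟩
            show i + 1 > h0
            omega
          rcases List.mem_cons.mp hx with rfl | hxr
          · omega
          · have := (List.pairwise_cons.mp hrec).1 x hxr
            omega

-- Every member of A's result is empty or starts with a positive element.
lemma A_head_pos (n s : Int) : ∀ t ∈ find_sum_sets n s, pvGE 1 t = true := by
  intro t ht
  by_cases hn : n = 0
  · subst hn
    rw [find_sum_sets] at ht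
    by_cases hs : s = 0 <;> simp [hs] at ht
    simp [ht, pvGE]
  · by_cases hs : s < 0
    · rw [find_sum_sets] at ht; simp [hn, hs] at ht
    · rw [A_eq n s hn hs] at ht
      simp only [List.mem_flatMap, PySem.List.mem_pyRange_one, List.mem_map] at ht
      obtain ⟨i, ⟨hi0, _⟩, t', _, rfl⟩ := ht
      simp [pvGE]
      omega

-- pvKeep and "first element > v" coincide on sorted lists.
lemma keep_eq_ge (v : Int) (t : List Int) (hs : t.Pairwise (· < ·)) :
    pvKeep v t = pvGE (v + 1) t := by
  cases t with
  | nil => simp [pvKeep, pvGE]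
  | cons h0 rest =>
    simp only [pvKeep, pvGE, List.headI, decide_eq_decide]
    constructor
    · rintro ⟨hmem, hcond⟩
      right
      have : v ≤ h0 := by
        by_contra hc
        exact hcond ⟨by simp, by omega⟩
      have : v ≠ h0 := fun h => hmem (by simp [h])
      omega
    · rintro (h | h)
      · simp at h
      · have hall : ∀ x ∈ rest, h0 < x := (List.pairwise_cons.mp hs).1
        constructor
        · intro hmem
          rcases List.mem_cons.mp hmem with rfl | hr
          · omega
          · have := hall _ hr; omega
        · rintro ⟨_, hgt⟩; omega

-- Filtering a block of sequences that all start with v by pvGE keeps all or none.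
lemma filter_pvGE_map_cons (lo v : Int) (l : List (List Int)) :
    (l.map (v :: ·)).filter (pvGE lo) =
      if lo ≤ v then l.map (v :: ·) else [] := by
  induction l with
  | nil => simp
  | cons t l ih =>
    simp only [List.map_cons, List.filter_cons, ih, pvGE, List.headI]
    by_cases h : lo ≤ v <;> simp [h]

-- Key invariant: pvGen n s lo lists exactly A's results whose first element is ≥ lo.
lemma gen_eq : ∀ (k : Nat) (s n : Int) (lo : Nat), s.toNat ≤ k → 1 ≤ lo →
    pvGen n s lo = (find_sum_sets n s).filter (pvGE lo) := by
  intro k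
  induction k using Nat.strong_induction_on with
  | _ k ih =>
  intro s n lo hk hlo
  by_cases hn : n = 0
  · subst hn
    rw [pvGen, find_sum_sets]
    by_cases hs : s = 0 <;> simp [hs, pvGE]
  · by_cases hs : s < 0
    · rw [B_eq n s lo hn]
      rw [PySem.List.pyRange_one_eq_nil (by omega : s + 1 ≤ (lo : Int))]
      rw [find_sum_sets]
      simp [hn, hs]
    · rw [B_eq n s lo hn, A_eq' n s hn hs, List.filter_flatMap]
      have hblock : ∀ f : Int, 1 ≤ f → f ≤ s →
          (((find_sum_sets (n - 1) (s - f)).filter (pvKeep f)).map (f :: ·)).filter (pvGE lo)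
            = if (lo : Int) ≤ f then
                ((find_sum_sets (n - 1) (s - f)).filter (pvKeep f)).map (f :: ·) else [] := by
        intro f _ _
        exact filter_pvGE_map_cons lo f _
      by_cases hlos : (lo : Int) ≤ s
      · -- split A's reindexed range at f = lo
        rw [PySem.List.pyRange_one_append 1 (lo : Int) (s + 1) (by omega) (by omega)]
        rw [List.flatMap_append]
        have hlow : (PySem.List.pyRange 1 (lo : Int) 1).flatMap
            (fun f => (((find_sum_sets (n - 1) (s - f)).filter (pvKeep f)).map (f :: ·)).filter (pvGE lo))
            = [] := by
          rw [List.flatMap_eq_nil_iff]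
          intro f hf
          have hf' := PySem.List.mem_pyRange_one.mp hf
          rw [filter_pvGE_map_cons, if_neg (by omega)]
        rw [hlow, List.nil_append]
        refine List.flatMap_congr ?_
        intro f hf
        have hf' := PySem.List.mem_pyRange_one.mp hf
        rw [filter_pvGE_map_cons, if_pos (by omega)]
        have hkeep : (find_sum_sets (n - 1) (s - f)).filter (pvKeep f)
            = (find_sum_sets (n - 1) (s - f)).filter (pvGE (f + 1)) := by
          refine List.filter_congr ?_
          intro t ht
          exact keep_eq_ge f t (A_sorted (s - f).toNat (s - f) (n - 1) (le_refl _) t ht)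
        rw [hkeep]
        have hih : pvGen (n - 1) (s - f) (f.toNat + 1)
            = (find_sum_sets (n - 1) (s - f)).filter (pvGE ((f.toNat : Int) + 1)) := by
          refine ih (s - f).toNat (by omega) (s - f) (n - 1) (f.toNat + 1) (le_refl _) (by omega)
        have hcast : ((f.toNat : Int)) = f := by omega
        rw [hih, hcast]
      · -- lo > s: both sides are empty
        rw [PySem.List.pyRange_one_eq_nil (by omega : s + 1 ≤ (lo : Int))]
        rw [List.flatMap_nil]
        symm
        rw [List.flatMap_eq_nil_iff]
        intro f hf
        have hf' := PySem.List.mem_pyRange_one.mp hf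
        rw [filter_pvGE_map_cons, if_neg (by omega)]

-- ===== VERDICT (by name: the statement is the Claim_ definition above) =====
theorem find_sum_sets_spec : Claim_equal_find_sum_sets := by
  intro n s _ _
  unfold Spec_find_sum_sets find_sum_sets_alt
  rw [gen_eq s.toNat s n 1 (le_refl _) (le_refl _)]
  exact (List.filter_eq_self.mpr (A_head_pos n s)).symm
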